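-- pv_equiv track=rewrite | github.com/jcole75/arc_2025_mindsai | src/modules/augmentation_framework.py | _split_grid
-- ===== SOURCE A (Python) =====
-- def _split_grid(grid: list[list[int]], method: str, sizes: list[dict]) -> tuple[list[list[list[int]]], bool]:
--     # Parse shape
--     try:
--         shp = method.split("_", 1)[1]
--         R, C = map(int, shp.split("x"))
--     except Exception:
--         return [], False
--     total = R * C
--     if not sizes or len(sizes) < total:
--         return [], False
--     # Compute row heights and col widths using expected maxima (as in combine)
--     row_heights = [0] * R
--     col_widths = [0] * C
--     for idx, s in enumerate(sizes[:total]):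
--         rr, cc = divmod(idx, C)
--         row_heights[rr] = max(row_heights[rr], int(s.get("height", 0)))
--         col_widths[cc] = max(col_widths[cc], int(s.get("width", 0)))
--     parts: list[list[list[int]]] = []
--     r0 = 0
--     idx = 0
--     for rr in range(R):
--         c0 = 0
--         for cc in range(C):
--             if idx >= total:
--                 break
--             cell_h = row_heights[rr]
--             cell_w = col_widths[cc]
--             # Slice the cell region
--             block = [row[c0 : c0 + cell_w] for row in grid[r0 : r0 + cell_h]]
--             # Crop back to original size for this cell
--             s = sizes[idx]
--             h = int(s.get("height", 0))
--             w = int(s.get("width", 0))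
--             block = [row[:w] for row in block[:h]]
--             parts.append(block)
--             c0 += cell_w
--             idx += 1
--         r0 += row_heights[rr]
--     return parts, True
-- ===== SOURCE B (Python) =====
-- def _split_grid(grid: list[list[int]], method: str, sizes: list[dict]) -> tuple[list[list[list[int]]], bool]:
--     try:
--         shp = method.split("_", 1)[1]
--         R, C = map(int, shp.split("x"))
--     except Exception:
--         return [], False
--     total = R * C
--     if not sizes or len(sizes) < total:
--         return [], False
--     # Stage 1: cut the size list into row-bands by consuming a queue (no index arithmetic).
--     chunks = []
--     queue = sizes[:total]
--     for _ in range(R):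
--         chunks.append(queue[:C])
--         queue = queue[C:]
--     # Stage 2: per-band max height; column widths by an elementwise zip-fold over the bands.
--     row_heights = [max([0] + [int(d.get("height", 0)) for d in ch]) for ch in chunks]
--     col_widths = [0] * C
--     for ch in chunks:
--         col_widths = [max(a, int(d.get("width", 0))) for a, d in zip(col_widths, ch)]
--     # Stage 3: emit blocks by successively chopping rows off the grid and columns off each band.
--     parts: list[list[list[int]]] = []
--     rest = grid
--     for ch, cell_h in zip(chunks, row_heights):
--         band, rest = rest[:cell_h], rest[cell_h:]
--         tails = band
--         for d, cell_w in zip(ch, col_widths):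
--             h = int(d.get("height", 0))
--             w = int(d.get("width", 0))
--             parts.append([t[:cell_w][:w] for t in tails[:h]])
--             tails = [t[cell_w:] for t in tails]
--     return parts, True
-- ===== Notes on version B (the rewrite author's own statement) =====
-- stated objective: alternative
-- what changed: No cell offsets or index arithmetic at all: B cuts the size list into row-band chunks by consuming a queue, computes column widths by an elementwise zip-fold over the chunks (instead of A's flat enumerate+divmod pass with in-place max updates), and emits blocks by destructively chopping bands of rows off the grid and columns off each band (take/drop of a shrinking remainder) instead of A's running-offset slicing with r0/c0/idx accumulators.
import Mathlib
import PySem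

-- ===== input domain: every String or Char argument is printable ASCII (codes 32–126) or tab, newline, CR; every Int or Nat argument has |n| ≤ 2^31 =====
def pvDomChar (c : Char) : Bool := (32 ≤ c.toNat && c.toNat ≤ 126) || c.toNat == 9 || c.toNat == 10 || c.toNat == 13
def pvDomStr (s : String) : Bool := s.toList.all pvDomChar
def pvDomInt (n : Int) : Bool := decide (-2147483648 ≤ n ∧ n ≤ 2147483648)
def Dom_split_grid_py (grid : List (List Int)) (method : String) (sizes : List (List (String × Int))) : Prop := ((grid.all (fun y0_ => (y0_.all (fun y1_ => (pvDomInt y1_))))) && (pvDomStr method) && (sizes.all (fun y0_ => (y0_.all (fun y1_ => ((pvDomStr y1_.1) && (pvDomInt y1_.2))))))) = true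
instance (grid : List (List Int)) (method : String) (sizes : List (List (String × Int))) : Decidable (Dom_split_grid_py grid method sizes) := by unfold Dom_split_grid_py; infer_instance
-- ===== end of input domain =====

-- B replaces A's index arithmetic wholesale: the size list is cut into row-band chunks by consuming a
-- queue, column widths come from an elementwise zip-fold over the chunks, and blocks are emitted by
-- destructively chopping row bands off the grid and columns off each band (objective: alternative).

-- the "R, C = map(int, shp.split('x'))" in a try: succeeds exactly when the split has two int()-parsable pieces
-- (any parse failure or wrong arity raises and is caught); shared parse prologue of both versions.
def pvParseShape (method : String) : Option (Int × Int) :=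
  match PySem.List.pyGet? ((PySem.Str.splitMax? method "_" 1).getD []) 1 with
  | none => none
  | some shp =>
    match ((PySem.Str.split? shp "x").getD []).mapM PySem.Int.ofStr? with
    | some [r, c] => some (r, c)
    | _ => none

-- ===== PORT A =====
-- sizes[idx] / row_heights[rr] / col_widths[cc] are ported with the total pyGetD/pySetD forms; whenever
-- Python would raise IndexError there the input is outside Pre_split_grid_py.
def split_grid_py (grid : List (List Int)) (method : String) (sizes : List (List (String × Int))) : List (List (List Int)) × Bool :=
  match pvParseShape method with
  | none => ([], false)
  | some (r, c) =>
    let total := r * c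
    if sizes = [] ∨ PySem.List.len sizes < total then ([], false)
    else
      -- first pass: one fold over enumerate(sizes[:total]) updating both arrays in place via divmod
      let st := (PySem.List.enumerate (PySem.List.slice sizes none (some total)) 0).foldl
        (fun (st : List Int × List Int) p =>
          let rr := PySem.Int.floordiv p.1 c
          let cc := PySem.Int.mod p.1 c
          (PySem.List.pySetD st.1 rr (max (PySem.List.pyGetD st.1 rr 0) ((PySem.Dict.mk p.2).getD "height" 0)),
           PySem.List.pySetD st.2 cc (max (PySem.List.pyGetD st.2 cc 0) ((PySem.Dict.mk p.2).getD "width" 0))))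
        (List.replicate r.toNat 0, List.replicate c.toNat 0)
      -- second pass: nested loops with running offsets r0/c0 and running cell index idx
      let fin := (PySem.List.pyRange 0 r 1).foldl
        (fun (ost : List (List (List Int)) × Int × Int) rr =>
          let ist := (PySem.List.pyRange 0 c 1).foldl
            (fun (ist : List (List (List Int)) × Int × Int) cc =>
              if total ≤ ist.2.2 then ist   -- 'if idx >= total: break' (nothing else happens after idx stops growing)
              else
                let cell_h := PySem.List.pyGetD st.1 rr 0
                let cell_w := PySem.List.pyGetD st.2 cc 0
                let block := (PySem.List.slice grid (some ost.2.1) (some (ost.2.1 + cell_h))).map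
                    (fun row => PySem.List.slice row (some ist.2.1) (some (ist.2.1 + cell_w)))
                let s := PySem.List.pyGetD sizes ist.2.2 []
                let h := (PySem.Dict.mk s).getD "height" 0
                let w := (PySem.Dict.mk s).getD "width" 0
                let block2 := (PySem.List.slice block none (some h)).map (fun row => PySem.List.slice row none (some w))
                (ist.1 ++ [block2], ist.2.1 + cell_w, ist.2.2 + 1))
            (ost.1, 0, ost.2.2)
          (ist.1, ost.2.1 + PySem.List.pyGetD st.1 rr 0, ist.2.2))
        ([], 0, 0)
      (fin.1, true)

-- ===== PORT B =====
-- max([0] + lst) is PySem.List.maxD ((0 : Int) :: lst) id 0; [0]*C is List.replicate c.toNat 0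
def split_grid_py_alt (grid : List (List Int)) (method : String) (sizes : List (List (String × Int))) : List (List (List Int)) × Bool :=
  match pvParseShape method with
  | none => ([], false)
  | some (r, c) =>
    let total := r * c
    if sizes = [] ∨ PySem.List.len sizes < total then ([], false)
    else
      -- Stage 1: cut sizes[:total] into row-band chunks by consuming a queue
      let chunks := ((PySem.List.pyRange 0 r 1).foldl
        (fun (st : List (List (List (String × Int))) × List (List (String × Int))) _ =>
          (st.1 ++ [PySem.List.slice st.2 none (some c)], PySem.List.slice st.2 (some c) none))
        ([], PySem.List.slice sizes none (some total))).1
      -- Stage 2: per-band max heights; column widths by an elementwise zip-fold over the bands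
      let rowH := chunks.map (fun ch =>
        PySem.List.maxD ((0 : Int) :: ch.map (fun d => (PySem.Dict.mk d).getD "height" 0)) id 0)
      let colW := chunks.foldl
        (fun (acc : List Int) ch => (acc.zip ch).map (fun p => max p.1 ((PySem.Dict.mk p.2).getD "width" 0)))
        (List.replicate c.toNat 0)
      -- Stage 3: chop row bands off the grid, then columns off each band
      let fin := (chunks.zip rowH).foldl
        (fun (st : List (List (List Int)) × List (List Int)) p =>
          let band := PySem.List.slice st.2 none (some p.2)
          let rest := PySem.List.slice st.2 (some p.2) none
          let inner := (p.1.zip colW).foldl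
            (fun (ist : List (List (List Int)) × List (List Int)) q =>
              let h := (PySem.Dict.mk q.1).getD "height" 0
              let w := (PySem.Dict.mk q.1).getD "width" 0
              (ist.1 ++ [(PySem.List.slice ist.2 none (some h)).map
                  (fun t => PySem.List.slice (PySem.List.slice t none (some q.2)) none (some w))],
               ist.2.map (fun t => PySem.List.slice t (some q.2) none)))
            (st.1, band)
          (inner.1, rest))
        ([], grid)
      (fin.1, true)

-- ===== PRECONDITION & SPEC =====
-- Pre_ excludes exactly the inputs where A raises IndexError: a parsed shape with a negative dimension,
-- past the size checks, with a nonempty sizes[:R*C] (the first divmod then indexes [0]*R or [0]*C out of range).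
def Pre_split_grid_py (grid : List (List Int)) (method : String) (sizes : List (List (String × Int))) : Prop :=
  match pvParseShape method with
  | none => True
  | some (r, c) =>
    (r < 0 ∨ c < 0) → (sizes = [] ∨ PySem.List.len sizes < r * c ∨ PySem.List.clampIdx sizes.length (r * c) ≤ 0)
instance (grid : List (List Int)) (method : String) (sizes : List (List (String × Int))) : Decidable (Pre_split_grid_py grid method sizes) := by
  unfold Pre_split_grid_py; rcases pvParseShape method with _ | ⟨r, c⟩ <;> exact inferInstance
def pvWitness_split_grid_py : List (List Int) × String × (List (List (String × Int))) :=
  ([[1, 2], [3, 4]], "split_1x2", [[("height", 2), ("width", 1)], [("height", 2), ("width", 1)]])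

def Spec_split_grid_py (grid : List (List Int)) (method : String) (sizes : List (List (String × Int))) (out : List (List (List Int)) × Bool) : Prop := out = split_grid_py_alt grid method sizes
instance (grid : List (List Int)) (method : String) (sizes : List (List (String × Int))) (out : List (List (List Int)) × Bool) : Decidable (Spec_split_grid_py grid method sizes out) := by unfold Spec_split_grid_py; infer_instance

-- ===== CLAIM (what is proved, stated in full; the proofs are below) =====
def Claim_equal_split_grid_py : Prop := ∀ (grid : List (List Int)) (method : String) (sizes : List (List (String × Int))), Dom_split_grid_py grid method sizes → Pre_split_grid_py grid method sizes → Spec_split_grid_py grid method sizes (split_grid_py grid method sizes)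
-- ===== LEMMAS AND PROOFS =====

-- height / width of the idx-th size dict
def pvH (sizes : List (List (String × Int))) (i : Nat) : Int :=
  (PySem.Dict.mk (sizes.getD i [])).getD "height" 0
def pvWd (sizes : List (List (String × Int))) (i : Nat) : Int :=
  (PySem.Dict.mk (sizes.getD i [])).getD "width" 0
-- per-row max height / per-column max width, and the assembled arrays
def pvMaxRow (sizes : List (List (String × Int))) (n rr : Nat) : Int :=
  ((List.range n).map (fun cc => pvH sizes (rr * n + cc))).foldl max 0
def pvMaxCol (sizes : List (List (String × Int))) (n m cc : Nat) : Int :=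
  ((List.range m).map (fun rr => pvWd sizes (rr * n + cc))).foldl max 0
def pvRowH (sizes : List (List (String × Int))) (m n : Nat) : List Int :=
  (List.range m).map (pvMaxRow sizes n)
def pvColW (sizes : List (List (String × Int))) (m n : Nat) : List Int :=
  (List.range n).map (pvMaxCol sizes n m)
-- the rr-th row-band chunk of sizes
def pvChunk (sizes : List (List (String × Int))) (n rr : Nat) : List (List (String × Int)) :=
  (List.range n).map (fun cc => sizes.getD (rr * n + cc) [])
-- the idx-th emitted block, in canonical composed-slice shape
def pvBlock (grid : List (List Int)) (sizes : List (List (String × Int))) (m n idx : Nat) : List (List Int) :=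
  let rr := idx / n
  let cc := idx % n
  let ro : Int := ((pvRowH sizes m n).take rr).sum
  let co : Int := ((pvColW sizes m n).take cc).sum
  let rh := (pvRowH sizes m n).getD rr 0
  let cw := (pvColW sizes m n).getD cc 0
  (PySem.List.slice (PySem.List.slice grid (some ro) (some (ro + rh))) none (some (pvH sizes idx))).map
    (fun row => PySem.List.slice (PySem.List.slice row (some co) (some (co + cw))) none (some (pvWd sizes idx)))

theorem pv_maxD_cons (l : List Int) : ∀ a : Int, PySem.List.maxD (a :: l) id 0 = l.foldl max a := by
  induction l with
  | nil => intro a; rfl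
  | cons x xs ih =>
    intro a
    by_cases hax : a < x
    · have h1 : PySem.List.maxD (a :: x :: xs) id 0 = PySem.List.maxD (x :: xs) id 0 := by
        simp [PySem.List.maxD, PySem.List.max?, hax]
      rw [h1, ih x, List.foldl_cons, max_eq_right (le_of_lt hax)]
    · have h1 : PySem.List.maxD (a :: x :: xs) id 0 = PySem.List.maxD (a :: xs) id 0 := by
        simp [PySem.List.maxD, PySem.List.max?, hax]
      rw [h1, ih a, List.foldl_cons, max_eq_left (not_lt.mp hax)]

theorem pv_slice_none_map (f : List Int → List Int) (xs : List (List Int)) (b : Int) :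
    PySem.List.slice (xs.map f) none (some b) = (PySem.List.slice xs none (some b)).map f := by
  simp [PySem.List.slice, List.map_take]

theorem pv_foldl_fst_const {α β γ : Type} (l : List γ) (f : (α × β) → γ → β) (init : α × β) :
    (l.foldl (fun ost x => (ost.1, f ost x)) init).1 = init.1 := by
  induction l generalizing init with
  | nil => rfl
  | cons x xs ih => exact ih _

theorem pv_range_mul_flat (m n : Nat) :
    List.range (m * n) = (List.range m).flatMap (fun rr => (List.range n).map (fun cc => rr * n + cc)) := by
  induction m with
  | zero => simp
  | succ m ih =>
    rw [Nat.succ_mul, List.range_add, ih, List.range_succ, List.flatMap_append]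
    simp [Nat.add_comm]

theorem pv_getD_take {α : Type} (xs : List α) (N k : Nat) (d : α) (h : k < N) :
    (xs.take N).getD k d = xs.getD k d := by
  simp [List.getD, List.getElem?_take_of_lt h]

-- one row of A's first pass, rows accumulator (constant target index rr)
theorem pv_inner_row (w : Nat → Int) (rr : Nat) :
    ∀ (q : Nat) (A : List Int), rr < A.length →
    (List.range q).foldl (fun A cc => A.set rr (max (A.getD rr 0) (w cc))) A
      = A.set rr (((List.range q).map w).foldl max (A.getD rr 0)) := by
  intro q
  induction q with
  | zero =>
    intro A hA
    simp only [List.range_zero, List.foldl_nil, List.map_nil, List.getD,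
      List.getElem?_eq_getElem hA, Option.getD_some, List.set_getElem_self]
  | succ q ih =>
    intro A hA
    rw [List.range_succ, List.foldl_append, ih A hA, List.foldl_cons, List.foldl_nil,
        List.map_append, List.foldl_append, List.map_cons, List.map_nil, List.foldl_cons,
        List.foldl_nil, List.set_set]
    congr 1
    have hlen : rr < (A.set rr (((List.range q).map w).foldl max (A.getD rr 0))).length := by
      simpa using hA
    rw [List.getD, List.getElem?_eq_getElem hlen, List.getElem_set]
    simp

-- A's first pass, rows component
theorem pv_rows_fold (sizes : List (List (String × Int))) (m n : Nat) :
    ((List.range (m * n)).foldl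
      (fun A k => A.set (k / n) (max (A.getD (k / n) 0) (pvH sizes k))) (List.replicate m (0 : Int)))
      = pvRowH sizes m n := by
  rw [pv_range_mul_flat, List.foldl_flatMap]
  suffices inv : ∀ s, s ≤ m →
      (List.range s).foldl (fun A rr =>
        (((List.range n).map (fun cc => rr * n + cc)).foldl
          (fun A k => A.set (k / n) (max (A.getD (k / n) 0) (pvH sizes k))) A))
        (List.replicate m (0 : Int))
      = (List.range m).map (fun j => if j < s then pvMaxRow sizes n j else 0) by
    rw [inv m le_rfl, pvRowH]
    exact List.map_congr_left (fun j hj => if_pos (List.mem_range.mp hj))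
  intro s
  induction s with
  | zero =>
    intro _
    simp only [List.range_zero, List.foldl_nil]
    rw [show (fun (j : Nat) => if j < 0 then pvMaxRow sizes n j else (0 : Int)) = (fun _ => (0:Int)) by
      funext j; simp]
    rw [List.map_const', List.length_range]
  | succ s ih =>
    intro hs
    have hs' : s < m := hs
    rw [List.range_succ, List.foldl_append, ih (le_of_lt hs'), List.foldl_cons, List.foldl_nil]
    rw [List.foldl_map]
    have hcong := PySem.List.foldl_congr_mem (List.range n)
      (fun A cc => A.set ((s * n + cc) / n) (max (A.getD ((s * n + cc) / n) 0) (pvH sizes (s * n + cc))))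
      (fun A cc => A.set s (max (A.getD s 0) (pvH sizes (s * n + cc))))
      ((List.range m).map (fun j => if j < s then pvMaxRow sizes n j else 0))
      (by
        intro A cc hcc
        have hcc' : cc < n := List.mem_range.mp hcc
        have hdiv : (s * n + cc) / n = s := by
          rw [Nat.mul_comm s n, Nat.mul_add_div (by omega), Nat.div_eq_of_lt hcc']
          omega
        dsimp only
        rw [hdiv])
    rw [hcong]
    have hAlen : s < ((List.range m).map (fun j => if j < s then pvMaxRow sizes n j else 0)).length := by
      simpa using hs'
    rw [pv_inner_row (fun cc => pvH sizes (s * n + cc)) s n _ hAlen]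
    rw [PySem.List.getD_map_range _ m s 0 hs']
    simp only [lt_irrefl]
    apply List.ext_getElem
    · simp
    · intro i hi1 hi2
      simp only [List.length_set, List.length_map, List.length_range] at hi1 hi2
      have hi : i < m := by simpa using hi2
      rw [List.getElem_set]
      by_cases his : s = i
      · subst his
        simp only [List.getElem_map, List.getElem_range]
        rw [if_pos (Nat.lt_succ_self s)]
        rfl
      · rw [if_neg his]
        simp only [List.getElem_map, List.getElem_range]
        by_cases hil : i < s
        · rw [if_pos hil, if_pos (by omega)]
        · rw [if_neg hil, if_neg (by omega)]

-- one row of A's first pass, columns accumulator (each position touched once)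
theorem pv_inner_cols (w : Nat → Int) :
    ∀ (q : Nat) (B : List Int),
    (List.range q).foldl (fun B cc => B.set cc (max (B.getD cc 0) (w cc))) B
      = (List.range B.length).map (fun j => if j < q then max (B.getD j 0) (w j) else B.getD j 0) := by
  intro q
  induction q with
  | zero =>
    intro B
    simp only [List.range_zero, List.foldl_nil, Nat.not_lt_zero, if_false]
    apply List.ext_getElem
    · simp
    · intro i h1 h2
      simp only [List.getElem_map, List.getElem_range, List.getD, List.getElem?_eq_getElem h1,
        Option.getD_some]
  | succ q ih =>
    intro B
    rw [List.range_succ, List.foldl_append, ih B, List.foldl_cons, List.foldl_nil]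
    apply List.ext_getElem
    · simp
    · intro i h1 h2
      simp only [List.length_set, List.length_map, List.length_range] at h1 h2
      rw [List.getElem_set]
      have hgq : ∀ j : Nat, j < B.length →
          ((List.range B.length).map (fun j => if j < q then max (B.getD j 0) (w j) else B.getD j 0)).getD j 0
            = (if j < q then max (B.getD j 0) (w j) else B.getD j 0) := by
        intro j hj
        exact PySem.List.getD_map_range _ B.length j 0 hj
      by_cases hqi : q = i
      · subst hqi
        rw [if_pos rfl, hgq q h2, if_neg (lt_irrefl q), List.getElem_map, List.getElem_range,
          if_pos (Nat.lt_succ_self q)]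
      · rw [if_neg hqi, List.getElem_map, List.getElem_range, List.getElem_map, List.getElem_range]
        by_cases hil : i < q
        · rw [if_pos hil, if_pos (by omega)]
        · rw [if_neg hil, if_neg (by omega)]

-- A's first pass, columns component
theorem pv_cols_fold (sizes : List (List (String × Int))) (m n : Nat) :
    ((List.range (m * n)).foldl
      (fun B k => B.set (k % n) (max (B.getD (k % n) 0) (pvWd sizes k))) (List.replicate n (0 : Int)))
      = pvColW sizes m n := by
  rw [pv_range_mul_flat, List.foldl_flatMap]
  suffices inv : ∀ s, s ≤ m →
      (List.range s).foldl (fun B rr =>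
        (((List.range n).map (fun cc => rr * n + cc)).foldl
          (fun B k => B.set (k % n) (max (B.getD (k % n) 0) (pvWd sizes k))) B))
        (List.replicate n (0 : Int))
      = (List.range n).map (fun j =>
          ((List.range s).map (fun rr => pvWd sizes (rr * n + j))).foldl max 0) by
    rw [inv m le_rfl]
    rfl
  intro s
  induction s with
  | zero =>
    intro _
    simp only [List.range_zero, List.foldl_nil, List.map_nil]
    simp
  | succ s ih =>
    intro hs
    rw [List.range_succ, List.foldl_append, ih (by omega), List.foldl_cons, List.foldl_nil,
      List.foldl_map]
    have hcong := PySem.List.foldl_congr_mem (List.range n)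
      (fun B cc => B.set ((s * n + cc) % n) (max (B.getD ((s * n + cc) % n) 0) (pvWd sizes (s * n + cc))))
      (fun B cc => B.set cc (max (B.getD cc 0) (pvWd sizes (s * n + cc))))
      ((List.range n).map (fun j => ((List.range s).map (fun rr => pvWd sizes (rr * n + j))).foldl max 0))
      (by
        intro B cc hcc
        have hcc' : cc < n := List.mem_range.mp hcc
        have hmod : (s * n + cc) % n = cc := by
          rw [Nat.mul_comm s n, Nat.mul_add_mod, Nat.mod_eq_of_lt hcc']
        dsimp only
        rw [hmod])
    rw [hcong, pv_inner_cols (fun cc => pvWd sizes (s * n + cc)) n]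
    apply List.ext_getElem
    · simp
    · intro i h1 h2
      simp only [List.length_map, List.length_range] at h1 h2
      simp only [List.getElem_map, List.getElem_range]
      rw [if_pos h2, PySem.List.getD_map_range _ n i 0 h2, List.map_append, List.foldl_append,
        List.map_cons, List.map_nil, List.foldl_cons, List.foldl_nil]

-- A under a successfully parsed nonnegative shape with the size checks passed
theorem pv_a_main (grid : List (List Int)) (method : String) (sizes : List (List (String × Int)))
    (m n : Nat) (hp : pvParseShape method = some ((m : Int), (n : Int)))
    (hck : ¬(sizes = [] ∨ PySem.List.len sizes < (m : Int) * (n : Int))) :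
    split_grid_py grid method sizes = ((List.range (m * n)).map (pvBlock grid sizes m n), true) := by
  have hcast : (m : Int) * (n : Int) = ((m * n : Nat) : Int) := by push_cast; ring
  rw [hcast] at hck
  have hlen : m * n ≤ sizes.length := by
    simp only [PySem.List.len, not_or, not_lt] at hck
    exact_mod_cast hck.2
  simp only [split_grid_py, hp, hcast, if_neg hck, PySem.List.pyRange_zero_natCast,
    List.foldl_map, PySem.List.slice_to_natCast]
  have hen : PySem.List.enumerate (sizes.take (m * n)) 0
      = (List.range (m * n)).map (fun (j : Nat) => ((j : Int), sizes.getD j [])) := by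
    rw [PySem.List.enumerate_eq_map_pyRange (sizes.take (m * n)) []]
    have hl : PySem.List.len (sizes.take (m * n)) = ((m * n : Nat) : Int) := by
      simp only [PySem.List.len, List.length_take]
      congr 1
      omega
    rw [hl, PySem.List.pyRange_zero_natCast, List.map_map]
    apply List.map_congr_left
    intro j hj
    have hj' := List.mem_range.mp hj
    simp only [Function.comp_apply, PySem.List.pyGetD_natCast, pv_getD_take _ _ _ _ hj']
  rw [hen, List.foldl_map]
  dsimp only
  simp only [PySem.Int.floordiv_natCast, PySem.Int.mod_natCast, PySem.List.pySetD_natCast,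
    PySem.List.pyGetD_natCast, Int.toNat_natCast,
    show ∀ j, ({ items := sizes.getD j [] } : PySem.Dict String Int).getD "height" 0 = pvH sizes j from fun _ => rfl,
    show ∀ j, ({ items := sizes.getD j [] } : PySem.Dict String Int).getD "width" 0 = pvWd sizes j from fun _ => rfl]
  simp only [PySem.List.foldl_prod_mk
      (f := fun (A : List Int) (j : Nat) => A.set (j / n) (max (A.getD (j / n) 0) (pvH sizes j)))
      (g := fun (B : List Int) (j : Nat) => B.set (j % n) (max (B.getD (j % n) 0) (pvWd sizes j)))]
  simp only [pv_rows_fold sizes m n, pv_cols_fold sizes m n]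
  suffices inv : ∀ s, s ≤ m →
      (List.foldl
        (fun (x : List (List (List Int)) × Int × Int) (y : Nat) =>
            ((List.foldl
                  (fun (x_1 : List (List (List Int)) × Int × Int) (y_1 : Nat) =>
                    if ((m * n : Nat) : Int) ≤ x_1.2.2 then x_1
                    else
                      (x_1.1 ++
                          [List.map
                              (fun row =>
                                PySem.List.slice row none
                                  (some ((PySem.Dict.mk (PySem.List.pyGetD sizes x_1.2.2 [])).getD "width" 0)))
                              (PySem.List.slice
                                (List.map
                                  (fun row =>
                                    PySem.List.slice row (some x_1.2.1)
                                      (some (x_1.2.1 + (pvColW sizes m n).getD y_1 0)))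
                                  (PySem.List.slice grid (some x.2.1) (some (x.2.1 + (pvRowH sizes m n).getD y 0))))
                                none (some ((PySem.Dict.mk (PySem.List.pyGetD sizes x_1.2.2 [])).getD "height" 0)))],
                        x_1.2.1 + (pvColW sizes m n).getD y_1 0, x_1.2.2 + 1))
                  (x.1, 0, x.2.2) (List.range n)).1,
              x.2.1 + (pvRowH sizes m n).getD y 0,
              (List.foldl
                    (fun (x_1 : List (List (List Int)) × Int × Int) (y_1 : Nat) =>
                    if ((m * n : Nat) : Int) ≤ x_1.2.2 then x_1
                    else
                      (x_1.1 ++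
                          [List.map
                              (fun row =>
                                PySem.List.slice row none
                                  (some ((PySem.Dict.mk (PySem.List.pyGetD sizes x_1.2.2 [])).getD "width" 0)))
                              (PySem.List.slice
                                (List.map
                                  (fun row =>
                                    PySem.List.slice row (some x_1.2.1)
                                      (some (x_1.2.1 + (pvColW sizes m n).getD y_1 0)))
                                  (PySem.List.slice grid (some x.2.1) (some (x.2.1 + (pvRowH sizes m n).getD y 0))))
                                none (some ((PySem.Dict.mk (PySem.List.pyGetD sizes x_1.2.2 [])).getD "height" 0)))],
                        x_1.2.1 + (pvColW sizes m n).getD y_1 0, x_1.2.2 + 1))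
                    (x.1, 0, x.2.2) (List.range n)).2.2))
        ([], 0, 0) (List.range s))
      = ((List.range (s * n)).map (pvBlock grid sizes m n),
         ((pvRowH sizes m n).take s).sum, ((s * n : Nat) : Int)) by
    rw [inv m le_rfl]
  intro s
  induction s with
  | zero => intro _; simp
  | succ s ih =>
    intro hs
    rw [List.range_succ, List.foldl_append, ih (by omega), List.foldl_cons, List.foldl_nil]
    dsimp only
    have hinner : ∀ t, t ≤ n →
        (List.foldl
          (fun (x_1 : List (List (List Int)) × Int × Int) (y_1 : Nat) =>
            if ((m * n : Nat) : Int) ≤ x_1.2.2 then x_1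
            else
              (x_1.1 ++
                  [List.map
                      (fun row =>
                        PySem.List.slice row none
                          (some ((PySem.Dict.mk (PySem.List.pyGetD sizes x_1.2.2 [])).getD "width" 0)))
                      (PySem.List.slice
                        (List.map
                          (fun row =>
                            PySem.List.slice row (some x_1.2.1) (some (x_1.2.1 + (pvColW sizes m n).getD y_1 0)))
                          (PySem.List.slice grid
                            (some ((List.take s (pvRowH sizes m n)).sum))
                            (some ((List.take s (pvRowH sizes m n)).sum + (pvRowH sizes m n).getD s 0))))
                        none (some ((PySem.Dict.mk (PySem.List.pyGetD sizes x_1.2.2 [])).getD "height" 0)))],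
                x_1.2.1 + (pvColW sizes m n).getD y_1 0, x_1.2.2 + 1))
          ((List.range (s * n)).map (pvBlock grid sizes m n), 0, ((s * n : Nat) : Int)) (List.range t))
        = ((List.range (s * n)).map (pvBlock grid sizes m n)
             ++ (List.range t).map (fun u => pvBlock grid sizes m n (s * n + u)),
           ((pvColW sizes m n).take t).sum, ((s * n + t : Nat) : Int)) := by
      intro t
      induction t with
      | zero => intro _; simp
      | succ t iht =>
        intro ht
        have hn : 0 < n := by omega
        rw [List.range_succ, List.foldl_append, iht (by omega), List.foldl_cons, List.foldl_nil]
        dsimp only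
        have hguard : ¬(((m * n : Nat) : Int) ≤ ((s * n + t : Nat) : Int)) := by
          have h1 : s * n + t < (s + 1) * n := by rw [Nat.succ_mul]; omega
          have h2 : (s + 1) * n ≤ m * n := Nat.mul_le_mul_right n hs
          exact_mod_cast Nat.not_le.mpr (Nat.lt_of_lt_of_le h1 h2)
        rw [if_neg hguard]
        have hdt : (s * n + t) / n = s := by
          rw [Nat.mul_comm s n, Nat.mul_add_div hn, Nat.div_eq_of_lt (by omega)]
          omega
        have hmt : (s * n + t) % n = t := by
          rw [Nat.mul_comm s n, Nat.mul_add_mod, Nat.mod_eq_of_lt (by omega)]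
        refine Prod.ext ?_ (Prod.ext ?_ ?_)
        · dsimp only
          rw [List.append_assoc]
          congr 1
          rw [List.map_append, List.map_cons, List.map_nil]
          congr 1
          congr 1
          rw [pv_slice_none_map, List.map_map]
          simp only [pvBlock, hdt, hmt, PySem.List.pyGetD_natCast]
          rfl
        · dsimp only
          have htl : t < (pvColW sizes m n).length := by simp [pvColW]; omega
          rw [List.sum_take_succ _ t htl, List.getD_eq_getElem _ 0 htl]
        · dsimp only
          push_cast
          ring
    rw [hinner n le_rfl]
    refine Prod.ext ?_ (Prod.ext ?_ ?_)
    · dsimp only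
      rw [Nat.succ_mul, List.range_add, List.map_append, List.map_map]
      rfl
    · dsimp only
      have hsl : s < (pvRowH sizes m n).length := by simp [pvRowH]; omega
      rw [List.sum_take_succ _ s hsl, List.getD_eq_getElem _ 0 hsl]
    · dsimp only
      have : s * n + n = (s + 1) * n := by rw [Nat.succ_mul]
      rw [this]

-- ===== lemmas for B =====

-- minimum of nothing: a ≤ foldl max a l
theorem pv_le_foldl_max (l : List Int) : ∀ a : Int, a ≤ l.foldl max a := by
  induction l with
  | nil => intro a; exact le_rfl
  | cons x xs ih => intro a; exact le_trans (le_max_left a x) (ih (max a x))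

theorem pv_sum_take_nonneg (l : List Int) (h : ∀ x ∈ l, 0 ≤ x) (k : Nat) : 0 ≤ (l.take k).sum :=
  List.sum_nonneg (fun x hx => h x (List.mem_of_mem_take hx))

theorem pv_rowH_mem_nonneg (sizes : List (List (String × Int))) (m n : Nat) :
    ∀ x ∈ pvRowH sizes m n, 0 ≤ x := by
  intro x hx
  rw [pvRowH, List.mem_map] at hx
  obtain ⟨rr, _, rfl⟩ := hx
  exact pv_le_foldl_max _ 0

theorem pv_colW_mem_nonneg (sizes : List (List (String × Int))) (m n : Nat) :
    ∀ x ∈ pvColW sizes m n, 0 ≤ x := by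
  intro x hx
  rw [pvColW, List.mem_map] at hx
  obtain ⟨cc, _, rfl⟩ := hx
  exact pv_le_foldl_max _ 0

-- composed slices: xs[a:][:b] = xs[a:a+b] and xs[a:][b:] = xs[a+b:] for 0 ≤ a, b
theorem pv_slice_comp_take {α : Type} (xs : List α) (a b : Int) (ha : 0 ≤ a) (hb : 0 ≤ b) :
    PySem.List.slice (PySem.List.slice xs (some a) none) none (some b)
      = PySem.List.slice xs (some a) (some (a + b)) := by
  rw [PySem.List.slice_from _ ha, PySem.List.slice_to _ hb,
    PySem.List.slice_toNat _ ha (by omega)]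
  congr 1
  omega

theorem pv_slice_comp_drop {α : Type} (xs : List α) (a b : Int) (ha : 0 ≤ a) (hb : 0 ≤ b) :
    PySem.List.slice (PySem.List.slice xs (some a) none) (some b) none
      = PySem.List.slice xs (some (a + b)) none := by
  rw [PySem.List.slice_from _ ha, PySem.List.slice_from _ hb,
    PySem.List.slice_from _ (by omega : (0:Int) ≤ a + b), List.drop_drop]
  congr 1
  omega

-- the queue-consuming chunk loop yields exactly the row-band chunks
theorem pv_chunk_take (sizes : List (List (String × Int))) (m n s : Nat)
    (hlen : m * n ≤ sizes.length) (hs : s < m) :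
    ((sizes.take (m * n)).drop (s * n)).take n = pvChunk sizes n s := by
  apply List.ext_getElem
  · have hsn : s * n + n ≤ m * n := by
      have h := Nat.mul_le_mul_right n hs
      rw [Nat.succ_mul] at h
      exact h
    rw [List.length_take, List.length_drop, List.length_take]
    simp only [pvChunk, List.length_map, List.length_range]
    omega
  · intro i h1 h2
    simp only [List.length_take, List.length_drop] at h1
    have hi : s * n + i < m * n := by
      have : (s + 1) * n ≤ m * n := Nat.mul_le_mul_right n hs
      rw [Nat.succ_mul] at this
      omega
    simp only [List.getElem_take, List.getElem_drop, pvChunk, List.getElem_map, List.getElem_range]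
    rw [List.getD_eq_getElem _ _ (by omega : s * n + i < sizes.length)]

theorem pv_chunks_fold (sizes : List (List (String × Int))) (m n : Nat)
    (hlen : m * n ≤ sizes.length) :
    ((List.range m).foldl
      (fun (st : List (List (List (String × Int))) × List (List (String × Int))) _ =>
        (st.1 ++ [st.2.take n], PySem.List.slice st.2 (some (n : Int)) none))
      ([], sizes.take (m * n)))
      = ((List.range m).map (pvChunk sizes n), []) := by
  suffices inv : ∀ s, s ≤ m →
      ((List.range s).foldl
        (fun (st : List (List (List (String × Int))) × List (List (String × Int))) _ =>
          (st.1 ++ [st.2.take n], PySem.List.slice st.2 (some (n : Int)) none))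
        ([], sizes.take (m * n)))
      = ((List.range s).map (pvChunk sizes n), (sizes.take (m * n)).drop (s * n)) by
    rw [inv m le_rfl, List.drop_eq_nil_of_le (by simp)]
  intro s
  induction s with
  | zero => intro _; simp
  | succ s ih =>
    intro hs
    rw [List.range_succ, List.foldl_append, ih (by omega), List.foldl_cons, List.foldl_nil]
    dsimp only
    rw [PySem.List.slice_from_natCast,
      pv_chunk_take sizes m n s hlen (by omega), List.drop_drop, List.map_append]
    simp [Nat.succ_mul, Nat.add_comm]

-- B's row heights over a chunk
theorem pv_rowH_chunk (sizes : List (List (String × Int))) (n rr : Nat) :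
    PySem.List.maxD ((0 : Int) :: (pvChunk sizes n rr).map (fun d => (PySem.Dict.mk d).getD "height" 0)) id 0
      = pvMaxRow sizes n rr := by
  rw [pv_maxD_cons, pvChunk, List.map_map, pvMaxRow]
  rfl

-- B's zip-fold for column widths
theorem pv_colW_zipfold (sizes : List (List (String × Int))) (m n : Nat) :
    (((List.range m).map (pvChunk sizes n)).foldl
      (fun (acc : List Int) ch => (acc.zip ch).map (fun p => max p.1 ((PySem.Dict.mk p.2).getD "width" 0)))
      (List.replicate n 0))
      = pvColW sizes m n := by
  rw [List.foldl_map]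
  suffices inv : ∀ s, s ≤ m →
      ((List.range s).foldl
        (fun (acc : List Int) rr => (acc.zip (pvChunk sizes n rr)).map
          (fun p => max p.1 ((PySem.Dict.mk p.2).getD "width" 0)))
        (List.replicate n 0))
      = (List.range n).map (fun cc => ((List.range s).map (fun rr => pvWd sizes (rr * n + cc))).foldl max 0) by
    rw [inv m le_rfl]
    rfl
  intro s
  induction s with
  | zero =>
    intro _
    simp
  | succ s ih =>
    intro hs
    rw [List.range_succ, List.foldl_append, ih (by omega), List.foldl_cons, List.foldl_nil]
    apply List.ext_getElem
    · simp [pvChunk]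
    · intro i h1 h2
      simp only [List.length_map, List.length_zip, List.length_range, pvChunk, Nat.min_self] at h1 h2
      have hi : i < n := by omega
      simp only [List.getElem_map, List.getElem_zip, List.getElem_range, pvChunk]
      rw [List.map_append, List.foldl_append]
      simp only [List.map_cons, List.map_nil, List.foldl_cons, List.foldl_nil]
      congr 1

-- B's chopping emission equals the canonical blocks
theorem pv_alt_emit (grid : List (List Int)) (sizes : List (List (String × Int))) (m n : Nat) :
    ((((List.range m).map (pvChunk sizes n)).zip
        (((List.range m).map (pvChunk sizes n)).map
          (fun ch => PySem.List.maxD ((0 : Int) :: ch.map (fun d => (PySem.Dict.mk d).getD "height" 0)) id 0))).foldl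
      (fun (st : List (List (List Int)) × List (List Int)) p =>
        ((((p.1.zip (pvColW sizes m n)).foldl
            (fun (ist : List (List (List Int)) × List (List Int)) q =>
              (ist.1 ++ [(PySem.List.slice ist.2 none (some ((PySem.Dict.mk q.1).getD "height" 0))).map
                  (fun t => PySem.List.slice (PySem.List.slice t none (some q.2)) none
                    (some ((PySem.Dict.mk q.1).getD "width" 0)))],
               ist.2.map (fun t => PySem.List.slice t (some q.2) none)))
            (st.1, PySem.List.slice st.2 none (some p.2))).1),
         PySem.List.slice st.2 (some p.2) none))
      ([], grid)).1
      = (List.range (m * n)).map (pvBlock grid sizes m n) := by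
  rw [List.map_map, List.zip_map']
  rw [List.foldl_map]
  -- invariant over the outer chop loop
  suffices inv : ∀ s, s ≤ m →
      ((List.range s).foldl
        (fun (st : List (List (List Int)) × List (List Int)) rr =>
          (((((pvChunk sizes n rr).zip (pvColW sizes m n)).foldl
              (fun (ist : List (List (List Int)) × List (List Int)) q =>
                (ist.1 ++ [(PySem.List.slice ist.2 none (some ((PySem.Dict.mk q.1).getD "height" 0))).map
                    (fun t => PySem.List.slice (PySem.List.slice t none (some q.2)) none
                      (some ((PySem.Dict.mk q.1).getD "width" 0)))],
                 ist.2.map (fun t => PySem.List.slice t (some q.2) none)))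
              (st.1, PySem.List.slice st.2 none (some (pvMaxRow sizes n rr)))).1),
           PySem.List.slice st.2 (some (pvMaxRow sizes n rr)) none))
        ([], grid))
      = ((List.range (s * n)).map (pvBlock grid sizes m n),
         PySem.List.slice grid (some ((pvRowH sizes m n).take s).sum) none) by
    dsimp only [Function.comp]
    simp only [pv_rowH_chunk]
    exact congrArg Prod.fst (inv m le_rfl)
  intro s
  induction s with
  | zero =>
    intro _
    simp [PySem.List.slice]
  | succ s ih =>
    intro hs
    rw [List.range_succ, List.foldl_append, ih (by omega), List.foldl_cons, List.foldl_nil]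
    dsimp only
    have hro : (0:Int) ≤ ((pvRowH sizes m n).take s).sum :=
      pv_sum_take_nonneg _ (pv_rowH_mem_nonneg sizes m n) s
    have hrh : (0:Int) ≤ pvMaxRow sizes n s := pv_le_foldl_max _ 0
    have hband : PySem.List.slice
        (PySem.List.slice grid (some ((pvRowH sizes m n).take s).sum) none) none
        (some (pvMaxRow sizes n s))
        = PySem.List.slice grid (some ((pvRowH sizes m n).take s).sum)
            (some (((pvRowH sizes m n).take s).sum + pvMaxRow sizes n s)) :=
      pv_slice_comp_take _ _ _ hro hrh
    have hrest : PySem.List.slice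
        (PySem.List.slice grid (some ((pvRowH sizes m n).take s).sum) none)
        (some (pvMaxRow sizes n s)) none
        = PySem.List.slice grid (some (((pvRowH sizes m n).take s).sum + pvMaxRow sizes n s)) none :=
      pv_slice_comp_drop _ _ _ hro hrh
    have hsl : s < (pvRowH sizes m n).length := by simp [pvRowH]; omega
    have hsum : ((pvRowH sizes m n).take (s + 1)).sum
        = ((pvRowH sizes m n).take s).sum + pvMaxRow sizes n s := by
      rw [List.sum_take_succ _ s hsl]
      congr 1
      simp [pvRowH]
    -- inner chop loop over one band
    have hinner : ∀ (band : List (List Int)), band = PySem.List.slice grid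
          (some ((pvRowH sizes m n).take s).sum)
          (some (((pvRowH sizes m n).take s).sum + pvMaxRow sizes n s)) →
        ∀ t, t ≤ n →
        (((pvChunk sizes n s).zip (pvColW sizes m n)).take t).foldl
          (fun (ist : List (List (List Int)) × List (List Int)) q =>
            (ist.1 ++ [(PySem.List.slice ist.2 none (some ((PySem.Dict.mk q.1).getD "height" 0))).map
                (fun u => PySem.List.slice (PySem.List.slice u none (some q.2)) none
                  (some ((PySem.Dict.mk q.1).getD "width" 0)))],
             ist.2.map (fun u => PySem.List.slice u (some q.2) none)))
          ((List.range (s * n)).map (pvBlock grid sizes m n), band)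
        = ((List.range (s * n)).map (pvBlock grid sizes m n)
             ++ (List.range t).map (fun u => pvBlock grid sizes m n (s * n + u)),
           band.map (fun row => PySem.List.slice row (some ((pvColW sizes m n).take t).sum) none)) := by
      intro band hbandeq t
      induction t with
      | zero =>
        intro _
        simp only [List.take_zero, List.foldl_nil, List.range_zero, List.map_nil, List.append_nil]
        refine Prod.ext rfl ?_
        dsimp only
        rw [List.sum_nil]
        symm
        apply List.ext_getElem
        · simp
        · intro i h1 h2
          simp only [List.getElem_map]
          rw [PySem.List.slice_from _ le_rfl]
          simp
      | succ t iht =>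
        intro ht
        have hn : 0 < n := by omega
        have hzl : t < ((pvChunk sizes n s).zip (pvColW sizes m n)).length := by
          simp [pvChunk, pvColW]
          omega
        rw [List.take_succ, List.getElem?_eq_getElem hzl]
        simp only [Option.toList_some]
        rw [List.foldl_append, iht (by omega), List.foldl_cons, List.foldl_nil]
        dsimp only
        have hget : (((pvChunk sizes n s).zip (pvColW sizes m n))[t]'hzl)
            = (sizes.getD (s * n + t) [], pvMaxCol sizes n m t) := by
          rw [List.getElem_zip]
          congr 1
          · simp [pvChunk]
          · simp [pvColW]
        rw [hget]
        have hco : (0:Int) ≤ ((pvColW sizes m n).take t).sum :=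
          pv_sum_take_nonneg _ (pv_colW_mem_nonneg sizes m n) t
        have hcw : (0:Int) ≤ pvMaxCol sizes n m t := pv_le_foldl_max _ 0
        have htl : t < (pvColW sizes m n).length := by simp [pvColW]; omega
        have hcsum : ((pvColW sizes m n).take (t + 1)).sum
            = ((pvColW sizes m n).take t).sum + pvMaxCol sizes n m t := by
          rw [List.sum_take_succ _ t htl]
          congr 1
          simp [pvColW]
        have hdt : (s * n + t) / n = s := by
          rw [Nat.mul_comm s n, Nat.mul_add_div hn, Nat.div_eq_of_lt (by omega)]
          omega
        have hmt : (s * n + t) % n = t := by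
          rw [Nat.mul_comm s n, Nat.mul_add_mod, Nat.mod_eq_of_lt (by omega)]
        refine Prod.ext ?_ ?_
        · dsimp only
          rw [List.append_assoc]
          congr 1
          rw [List.range_succ, List.map_append, List.map_cons, List.map_nil]
          congr 2
          rw [pv_slice_none_map (f := fun row => PySem.List.slice row
                (some ((pvColW sizes m n).take t).sum) none) band, List.map_map]
          simp only [pvBlock, hdt, hmt, hbandeq]
          have hrowgetD : (pvRowH sizes m n).getD s 0 = pvMaxRow sizes n s := by
            rw [pvRowH, PySem.List.getD_map_range _ m s 0 (by omega)]
          have hcolgetD : (pvColW sizes m n).getD t 0 = pvMaxCol sizes n m t := by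
            rw [pvColW, PySem.List.getD_map_range _ n t 0 (by omega)]
          rw [hrowgetD, hcolgetD]
          apply List.map_congr_left
          intro row _
          simp only [Function.comp_apply]
          rw [pv_slice_comp_take _ _ _ hco hcw]
          rfl
        · dsimp only
          rw [List.map_map, hcsum]
          apply List.map_congr_left
          intro row _
          simp only [Function.comp_apply]
          exact pv_slice_comp_drop _ _ _ hco hcw
    have hzip : ((pvChunk sizes n s).zip (pvColW sizes m n)).take n
        = (pvChunk sizes n s).zip (pvColW sizes m n) := by
      apply List.take_of_length_le
      simp [pvChunk, pvColW]
    rw [hband, hrest]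
    have := hinner _ rfl n le_rfl
    rw [hzip] at this
    rw [this]
    refine Prod.ext ?_ ?_
    · dsimp only
      rw [Nat.succ_mul, List.range_add, List.map_append, List.map_map]
      rfl
    · dsimp only
      rw [hsum]

-- B under a successfully parsed nonnegative shape with the size checks passed
theorem pv_alt_main (grid : List (List Int)) (method : String) (sizes : List (List (String × Int)))
    (m n : Nat) (hp : pvParseShape method = some ((m : Int), (n : Int)))
    (hck : ¬(sizes = [] ∨ PySem.List.len sizes < (m : Int) * (n : Int))) :
    split_grid_py_alt grid method sizes = ((List.range (m * n)).map (pvBlock grid sizes m n), true) := by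
  have hcast : (m : Int) * (n : Int) = ((m * n : Nat) : Int) := by push_cast; ring
  rw [hcast] at hck
  have hlen : m * n ≤ sizes.length := by
    simp only [PySem.List.len, not_or, not_lt] at hck
    exact_mod_cast hck.2
  simp only [split_grid_py_alt, hp, hcast, if_neg hck, PySem.List.pyRange_zero_natCast,
    List.foldl_map, PySem.List.slice_to_natCast, Int.toNat_natCast]
  rw [show ((List.range m).foldl
      (fun (st : List (List (List (String × Int))) × List (List (String × Int))) _ =>
        (st.1 ++ [st.2.take n], PySem.List.slice st.2 (some (n : Int)) none))
      ([], sizes.take (m * n)))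
      = ((List.range m).map (pvChunk sizes n), []) from pv_chunks_fold sizes m n hlen]
  rw [pv_colW_zipfold sizes m n]
  rw [pv_alt_emit grid sizes m n]

-- the Pre_-admitted negative-dimension corner: both sides return ([], true)
theorem pv_chunks_nil_queue (c : Int) :
    ∀ (l : List Int) (acc : List (List (List (String × Int)))),
    (l.foldl
      (fun (st : List (List (List (String × Int))) × List (List (String × Int))) _ =>
        (st.1 ++ [PySem.List.slice st.2 none (some c)], PySem.List.slice st.2 (some c) none))
      (acc, []))
      = (acc ++ List.replicate l.length [], []) := by
  intro l
  induction l with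
  | nil => intro acc; simp
  | cons x xs ih =>
    intro acc
    rw [List.foldl_cons]
    have h1 : PySem.List.slice ([] : List (List (String × Int))) none (some c) = [] := by
      simp [PySem.List.slice]
    have h2 : PySem.List.slice ([] : List (List (String × Int))) (some c) none = [] := by
      simp [PySem.List.slice]
    dsimp only
    rw [h1, h2, ih]
    simp [List.replicate_succ]

theorem pv_zipfold_nil {α β : Type} (g : β × α → β) (l : List (List α)) :
    l.foldl (fun (acc : List β) ch => (acc.zip ch).map g) [] = [] := by
  induction l with
  | nil => rfl
  | cons x xs ih =>
    rw [List.foldl_cons]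
    simp only [List.zip_nil_left, List.map_nil]
    exact ih

theorem pv_neg_case (grid : List (List Int)) (method : String) (sizes : List (List (String × Int)))
    (r c : Int) (hp : pvParseShape method = some (r, c))
    (hck : ¬(sizes = [] ∨ PySem.List.len sizes < r * c))
    (hneg : r < 0 ∨ c < 0) (hcl : PySem.List.clampIdx sizes.length (r * c) ≤ 0) :
    split_grid_py grid method sizes = ([], true) ∧ split_grid_py_alt grid method sizes = ([], true) := by
  have hcl' : PySem.List.clampIdx sizes.length (r * c) = 0 := Nat.le_zero.mp hcl
  have hsl : PySem.List.slice sizes none (some (r * c)) = [] := by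
    simp [PySem.List.slice, hcl']
  have hrc : r * c ≤ 0 := by
    by_contra hpos
    push_neg at hpos
    have h1 : ¬(r * c < 0) := by omega
    have h2 : 0 < (r * c).toNat := by omega
    simp only [PySem.List.clampIdx, if_neg h1] at hcl'
    have hlen0 : sizes.length = 0 := by omega
    exact hck (Or.inl (List.length_eq_zero_iff.mp hlen0))
  constructor
  · simp only [split_grid_py, hp, if_neg hck, hsl, PySem.List.enumerate_nil, List.foldl_nil]
    rcases hneg with hr | hc
    · rw [PySem.List.pyRange_one_eq_nil (le_of_lt hr), List.foldl_nil]
    · rw [PySem.List.pyRange_one_eq_nil (le_of_lt hc)]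
      simp only [List.foldl_nil]
      refine Prod.ext ?_ rfl
      exact pv_foldl_fst_const _ _ _
  · simp only [split_grid_py_alt, hp, if_neg hck, hsl]
    by_cases hr : r < 0
    · rw [PySem.List.pyRange_one_eq_nil (le_of_lt hr)]
      simp
    · have hc : c < 0 := hneg.resolve_left hr
      rw [pv_chunks_nil_queue c (PySem.List.pyRange 0 r 1) []]
      dsimp only
      rw [List.nil_append, List.map_replicate, List.zip_replicate, Nat.min_self,
        Int.toNat_of_nonpos (le_of_lt hc)]
      simp only [List.map_nil, List.replicate_zero]
      rw [pv_zipfold_nil]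
      refine Prod.ext ?_ rfl
      dsimp only
      generalize (PySem.List.pyRange 0 r 1).length = K
      induction K generalizing grid with
      | zero => rfl
      | succ K ih =>
        rw [List.replicate_succ, List.foldl_cons]
        simp only [List.zip_nil_left, List.foldl_nil]
        exact ih _

-- ===== VERDICT (by name: the statement is the Claim_ definition above) =====
theorem split_grid_py_spec : Claim_equal_split_grid_py := by
  intro grid method sizes _hdom hpre
  unfold Spec_split_grid_py
  unfold Pre_split_grid_py at hpre
  rcases hp : pvParseShape method with _ | ⟨r, c⟩
  · simp only [split_grid_py, split_grid_py_alt, hp]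
  · rw [hp] at hpre
    by_cases hck : sizes = [] ∨ PySem.List.len sizes < r * c
    · simp only [split_grid_py, split_grid_py_alt, hp, if_pos hck]
    · by_cases hneg : r < 0 ∨ c < 0
      · rcases hpre hneg with h | h | h
        · exact absurd (Or.inl h) hck
        · exact absurd (Or.inr h) hck
        · obtain ⟨ha, hb⟩ := pv_neg_case grid method sizes r c hp hck hneg h
          rw [ha, hb]
      · push_neg at hneg
        obtain ⟨hr, hc⟩ := hneg
        obtain ⟨m, rfl⟩ : ∃ m : Nat, r = (m : Int) := ⟨r.toNat, (Int.toNat_of_nonneg hr).symm⟩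
        obtain ⟨n, rfl⟩ : ∃ n : Nat, c = (n : Int) := ⟨c.toNat, (Int.toNat_of_nonneg hc).symm⟩
        rw [pv_a_main grid method sizes m n hp hck, pv_alt_main grid method sizes m n hp hck]
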